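-- pv_equiv track=rewrite | github.com/machinereading/kbagent_0.2a | nlg_module.py | selectKeywords
-- ===== SOURCE A (Python) =====
-- def selectKeywords(keywords, maxkeyword=3):
-- 	def gen(keywords, num):
-- 		if num == 0: return []
-- 		if num <= 1:
-- 			return list(map(lambda x: [x], keywords))
-- 		result = []
-- 		for i in range(len(keywords)):
-- 			startElem = keywords[i]
-- 			for item in gen(keywords[i+1:], num-1):
-- 				result.append([startElem, *item])
-- 		return result
-- 	result = []
-- 	for i in range(1, maxkeyword+1):
-- 		for item in gen(keywords, i):
-- 			result.append(item)
-- 	return result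
-- ===== SOURCE B (Python) =====
-- def selectKeywords(keywords, maxkeyword=3):
--     # DP over the list from the right: one table entry per size 1..m,
--     # each updated in a single pass per element; no repeated recursion over suffixes.
--     m = min(maxkeyword, len(keywords))
--     if m < 0:
--         m = 0
--     table = [[] for _ in range(m)]
--     for x in reversed(keywords):
--         prev = [[]]
--         new_table = []
--         for cur in table:
--             new_table.append([[x] + c for c in prev] + cur)
--             prev = cur
--         table = new_table
--     out = []
--     for sz in table:
--         out.extend(sz)
--     return out
-- ===== Notes on version B (the rewrite author's own statement) =====
-- stated objective: alternative
-- what changed: A re-runs a recursive generator over every suffix separately for each size 1..maxkeyword; B makes a single right-to-left pass maintaining a DP table with one list of combinations per size (capped at min(maxkeyword, len(keywords))), then concatenates the table.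
import Mathlib
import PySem

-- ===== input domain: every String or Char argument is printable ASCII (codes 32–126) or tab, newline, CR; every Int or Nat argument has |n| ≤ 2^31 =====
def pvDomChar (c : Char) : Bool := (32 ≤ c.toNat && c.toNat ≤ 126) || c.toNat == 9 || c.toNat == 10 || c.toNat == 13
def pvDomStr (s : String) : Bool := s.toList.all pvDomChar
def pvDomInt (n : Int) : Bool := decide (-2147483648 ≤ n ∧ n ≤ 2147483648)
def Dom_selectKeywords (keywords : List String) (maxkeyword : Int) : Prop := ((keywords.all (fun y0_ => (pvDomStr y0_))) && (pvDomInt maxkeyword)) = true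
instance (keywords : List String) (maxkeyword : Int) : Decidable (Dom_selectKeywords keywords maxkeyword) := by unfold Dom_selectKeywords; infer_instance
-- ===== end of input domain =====

-- B replaces A's per-size re-recursion over suffixes by a single right-to-left DP pass
-- maintaining one table entry per size (objective: alternative decomposition).

-- ===== PORT A =====
-- A's inner gen: the loop index i ranges over 0..len-1, so keywords[i] → ks.getD i ""
-- and keywords[i+1:] → ks.drop (i+1) are exact (index always in range, nonnegative).
def genA (ks : List String) (num : Int) : List (List String) :=
  if num = 0 then []
  else if num ≤ 1 then ks.map (fun x => [x])
  else
    (List.range ks.length).foldl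
      (fun result i =>
        result ++ (genA (ks.drop (i+1)) (num-1)).map (fun item => ks.getD i "" :: item)) []
termination_by num.toNat
decreasing_by omega

def selectKeywords (keywords : List String) (maxkeyword : Int) : List (List String) :=
  (PySem.List.pyRange 1 (maxkeyword+1) 1).foldl
    (fun result i => result ++ genA keywords i) []

-- ===== PORT B =====
-- one update step of the DP table: entry s holds the size-(s+1) combinations so far
def stepAux (x : String) : List (List String) → List (List (List String)) → List (List (List String))
  | _, [] => []
  | prev, cur :: rest => ((prev.map (fun c => x :: c)) ++ cur) :: stepAux x cur rest

def selectKeywords_alt (keywords : List String) (maxkeyword : Int) : List (List String) :=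
  let m : Nat := (min maxkeyword (keywords.length : Int)).toNat
  let table := keywords.foldr (fun x t => stepAux x [[]] t) (List.replicate m [])
  table.foldl (fun out sz => out ++ sz) []

-- ===== PRECONDITION & SPEC =====
def Spec_selectKeywords (keywords : List String) (maxkeyword : Int) (out : List (List String)) : Prop := out = selectKeywords_alt keywords maxkeyword
instance (keywords : List String) (maxkeyword : Int) (out : List (List String)) : Decidable (Spec_selectKeywords keywords maxkeyword out) := by unfold Spec_selectKeywords; infer_instance

-- ===== CLAIM (what is proved, stated in full; the proofs are below) =====
def Claim_equal_selectKeywords : Prop := ∀ (keywords : List String) (maxkeyword : Int), Dom_selectKeywords keywords maxkeyword → Spec_selectKeywords keywords maxkeyword (selectKeywords keywords maxkeyword)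

-- ===== LEMMAS AND PROOFS =====

-- mathematical reference: combinations of a given size, lexicographic by index
def Cmb : Nat → List String → List (List String)
  | 0, _ => [[]]
  | _+1, [] => []
  | s+1, x :: rest => (Cmb s rest).map (fun c => x :: c) ++ Cmb (s+1) rest

theorem flatMap_congr' {α β : Type} (l : List α) (f g : α → List β)
    (h : ∀ x ∈ l, f x = g x) : l.flatMap f = l.flatMap g := by
  induction l with
  | nil => rfl
  | cons a t ih =>
      simp only [List.flatMap_cons, h a (List.mem_cons_self), ih fun x hx => h x (List.mem_cons_of_mem a hx)]

theorem Cmb_eq_nil : ∀ (ks : List String) (s : Nat), ks.length < s → Cmb s ks = [] := by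
  intro ks
  induction ks with
  | nil =>
      intro s hs
      cases s with
      | zero => omega
      | succ s => rfl
  | cons x rest ih =>
      intro s hs
      cases s with
      | zero => simp at hs
      | succ s =>
          simp only [List.length_cons] at hs
          simp [Cmb, ih s (by omega), ih (s+1) (by omega)]

theorem genA_one (ks : List String) : genA ks 1 = Cmb 1 ks := by
  rw [genA]
  norm_num
  induction ks with
  | nil => rfl
  | cons x rest ih => simp [Cmb, ih]

theorem genA_two (s : Nat) (ks : List String) :
    genA ks ((s:Int)+1+1) =
      (List.range ks.length).flatMap
        (fun i => (genA (ks.drop (i+1)) ((s:Int)+1)).map (fun item => ks.getD i "" :: item)) := by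
  rw [genA]
  rw [if_neg (by omega), if_neg (by omega)]
  rw [PySem.List.foldl_append_eq_flatMap]
  simp only [List.nil_append]
  congr 1
  funext i
  congr 2
  omega

theorem genA_eq (s : Nat) : ∀ ks : List String, genA ks ((s:Int)+1) = Cmb (s+1) ks := by
  induction s with
  | zero => intro ks; simpa using genA_one ks
  | succ s ih =>
      intro ks
      induction ks with
      | nil =>
          rw [show ((s+1:Nat):Int)+1 = ((s:Int)+1+1) by push_cast; ring, genA_two]
          rfl
      | cons x rest ihks =>
          rw [show ((s+1:Nat):Int)+1 = ((s:Int)+1+1) by push_cast; ring] at ihks ⊢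
          rw [genA_two]
          simp only [List.length_cons, List.range_succ_eq_map, List.flatMap_cons, List.flatMap_map,
            Nat.succ_eq_add_one]
          have h1 : (genA ((x :: rest).drop (0+1)) ((s:Int)+1)).map (fun item => (x :: rest).getD 0 "" :: item)
              = (Cmb (s+1) rest).map (fun c => x :: c) := by
            simp [ih rest]
          have h2 : (List.range rest.length).flatMap
                (fun a => (genA ((x :: rest).drop (a+1+1)) ((s:Int)+1)).map (fun item => (x :: rest).getD (a+1) "" :: item))
              = genA rest ((s:Int)+1+1) := by
            rw [genA_two]
            apply flatMap_congr'
            intro i _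
            simp
          rw [h1, h2, ihks]
          rfl

theorem Cmb_zero (ks : List String) : Cmb 0 ks = [[]] := by
  cases ks <;> rfl

theorem stepAux_spec (x : String) (rest : List String) :
    ∀ (m k : Nat),
      stepAux x (Cmb k rest) ((List.range m).map (fun j => Cmb (k+1+j) rest))
        = (List.range m).map (fun j => Cmb (k+1+j) (x :: rest)) := by
  intro m
  induction m with
  | zero => intro k; rfl
  | succ m ih =>
      intro k
      rw [List.range_succ_eq_map, List.map_cons, List.map_cons, List.map_map, List.map_map,
        stepAux]
      refine congrArg₂ List.cons rfl ?_
      have e1 : ((fun j => Cmb (k+1+j) rest) ∘ Nat.succ) = (fun j => Cmb (k+1+1+j) rest) := by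
        funext j
        simp only [Function.comp_apply]
        congr 1
        omega
      have e2 : ((fun j => Cmb (k+1+j) (x :: rest)) ∘ Nat.succ) = (fun j => Cmb (k+1+1+j) (x :: rest)) := by
        funext j
        simp only [Function.comp_apply]
        congr 1
        omega
      rw [e1, e2]
      exact ih (k+1)

theorem table_eq (m : Nat) (ks : List String) :
      ks.foldr (fun x t => stepAux x [[]] t) (List.replicate m [])
        = (List.range m).map (fun j => Cmb (1+j) ks) := by
  induction ks with
  | nil =>
      apply List.ext_getElem
      · simp
      · intro i h1 h2
        simp only [List.foldr_nil, List.getElem_replicate, List.getElem_map, List.getElem_range]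
        rw [show (1 + i) = i + 1 by omega]
        rfl
  | cons x rest ih =>
      show stepAux x [[]] (rest.foldr (fun x t => stepAux x [[]] t) (List.replicate m [])) = _
      rw [ih]
      have h := stepAux_spec x rest m 0
      simp only [Nat.zero_add, Cmb_zero] at h
      exact h

theorem range_flatMap_extend {α : Type} (f : Nat → List α) (m M : Nat) (hm : m ≤ M)
    (h : ∀ k, m ≤ k → k < M → f k = []) :
    (List.range M).flatMap f = (List.range m).flatMap f := by
  obtain ⟨d, rfl⟩ := Nat.exists_eq_add_of_le hm
  rw [List.range_add, List.flatMap_append, List.flatMap_map]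
  have hnil : (List.range d).flatMap (fun x => f (m + x)) = [] := by
    apply List.flatMap_eq_nil_iff.mpr
    intro x hx
    exact h (m + x) (by omega) (by simp at hx; omega)
  rw [hnil, List.append_nil]

theorem selectKeywords_main (keywords : List String) (mk : Int) :
    selectKeywords keywords mk = selectKeywords_alt keywords mk := by
  have hB : selectKeywords_alt keywords mk
      = (List.range ((min mk (keywords.length : Int)).toNat)).flatMap (fun j => Cmb (1+j) keywords) := by
    show (keywords.foldr (fun x t => stepAux x [[]] t)
        (List.replicate ((min mk (keywords.length : Int)).toNat) [])).foldl (fun out sz => out ++ sz) [] = _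
    rw [table_eq, PySem.List.foldl_append_eq_flatten, List.nil_append]
    exact (List.flatMap_def).symm
  have hA : selectKeywords keywords mk
      = (List.range mk.toNat).flatMap (fun k => Cmb (1+k) keywords) := by
    unfold selectKeywords
    rw [PySem.List.foldl_append_eq_flatMap, List.nil_append, PySem.List.pyRange_one, List.flatMap_map]
    rw [show (mk+1-1).toNat = mk.toNat by omega]
    apply flatMap_congr'
    intro k _
    show genA keywords (1 + (k:Int)) = Cmb (1+k) keywords
    rw [show (1 + (k:Int)) = (k:Int)+1 by ring, genA_eq, Nat.add_comm]
  rw [hA, hB]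
  apply range_flatMap_extend
  · omega
  · intro k hk1 hk2
    apply Cmb_eq_nil
    omega

-- ===== VERDICT (by name: the statement is the Claim_ definition above) =====
theorem selectKeywords_spec : Claim_equal_selectKeywords := by
  intro keywords maxkeyword _
  exact selectKeywords_main keywords maxkeyword
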